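-- pv_equiv track=rewrite | github.com/maspayn3/coding_practice | python/daily/781_rabbits_in_forest.py | num_rabbits
-- ===== SOURCE A (Python) =====
-- from typing import List
--
-- def num_rabbits(answers: List[int]):
--     answers.sort()
--     res = 0
--     count = 0
--
--     for i in range(len(answers)):
--         if answers[i] == 0:
--             res += 1
--         elif i == 0 or answers[i] != answers[i - 1] or count == 0:
--             res += answers[i] + 1
--             count = answers[i]
--         else:
--             count -= 1
--     return res
-- ===== SOURCE B (Python) =====
-- def num_rabbits(answers):
--     # One pass, no sort: keep per-answer-value remaining group capacity in a dict.
--     rem = {}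
--     res = 0
--     for a in answers:
--         if rem.get(a, 0) == 0:
--             res += a + 1
--             rem[a] = a
--         else:
--             rem[a] -= 1
--     return res
-- ===== Notes on version B (the rewrite author's own statement) =====
-- stated objective: faster
-- what changed: Replaced sort-then-scan over adjacent duplicates with a single unsorted pass that tracks each answer value's remaining group capacity in a dict.
import Mathlib
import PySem

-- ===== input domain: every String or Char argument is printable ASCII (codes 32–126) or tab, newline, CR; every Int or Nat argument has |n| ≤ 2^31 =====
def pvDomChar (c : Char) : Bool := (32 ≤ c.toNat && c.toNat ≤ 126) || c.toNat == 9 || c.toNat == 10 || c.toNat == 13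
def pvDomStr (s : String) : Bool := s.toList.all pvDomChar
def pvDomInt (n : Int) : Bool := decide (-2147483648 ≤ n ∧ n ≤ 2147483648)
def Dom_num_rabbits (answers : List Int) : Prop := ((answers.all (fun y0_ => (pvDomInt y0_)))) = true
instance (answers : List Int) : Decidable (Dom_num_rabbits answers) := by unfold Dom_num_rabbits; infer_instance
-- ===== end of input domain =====

-- B replaces A's sort-then-scan with a single dict-driven pass (no sort); equal return value everywhere.
-- Note: Python A sorts its argument in place; B does not mutate it — the equivalence proved is about the return value.


-- ===== PORT A =====
-- loop body of A's 'for i in range(len(answers))' (state = (res, count))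
def numRabbitsBodyA (ys : List Int) (s : Int × Int) (i : Int) : Int × Int :=
  if PySem.List.pyGetD ys i 0 == 0 then
    (s.1 + 1, s.2)
  else if i == 0 || !(PySem.List.pyGetD ys i 0 == PySem.List.pyGetD ys (i - 1) 0) || s.2 == 0 then
    (s.1 + (PySem.List.pyGetD ys i 0 + 1), PySem.List.pyGetD ys i 0)
  else
    (s.1, s.2 - 1)

def num_rabbits (answers : List Int) : Int :=
  let ys := PySem.List.sorted answers (fun x => x) false
  ((PySem.List.pyRange 0 (PySem.List.len ys) 1).foldl (numRabbitsBodyA ys) (0, 0)).1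

-- ===== PORT B =====
-- loop body of B's single pass (state = (rem, res); rem = dict answer-value -> remaining slots)
def numRabbitsBodyB (s : PySem.Dict Int Int × Int) (a : Int) : PySem.Dict Int Int × Int :=
  if s.1.getD a 0 == 0 then
    (s.1.insert a a, s.2 + (a + 1))
  else
    (s.1.insert a (s.1.getD a 0 - 1), s.2)

def num_rabbits_alt (answers : List Int) : Int :=
  (answers.foldl numRabbitsBodyB (PySem.Dict.empty, 0)).2

-- ===== PRECONDITION & SPEC =====
def Spec_num_rabbits (answers : List Int) (out : Int) : Prop := out = num_rabbits_alt answers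
instance (answers : List Int) (out : Int) : Decidable (Spec_num_rabbits answers out) := by unfold Spec_num_rabbits; infer_instance

-- ===== CLAIM (what is proved, stated in full; the proofs are below) =====
def Claim_equal_num_rabbits : Prop := ∀ (answers : List Int), Dom_num_rabbits answers → Spec_num_rabbits answers (num_rabbits answers)

-- ===== LEMMAS AND PROOFS =====

-- Abstract version of B's loop: the dict replaced by a total function Int → Int.
def rabbitStep (s : (Int → Int) × Int) (a : Int) : (Int → Int) × Int :=
  if s.1 a = 0 then (Function.update s.1 a a, s.2 + (a + 1))
  else (Function.update s.1 a (s.1 a - 1), s.2)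

lemma getD_insert_fun (d : PySem.Dict Int Int) (a v : Int) :
    (fun x => (d.insert a v).getD x 0) = Function.update (fun x => d.getD x 0) a v := by
  funext x
  rw [PySem.Dict.getD_insert]
  by_cases hx : x = a <;> simp [hx, Function.update]

lemma alt_bridge : ∀ (l : List Int) (d : PySem.Dict Int Int) (res : Int),
    (l.foldl numRabbitsBodyB (d, res)).2
      = (l.foldl rabbitStep ((fun x => d.getD x 0), res)).2 := by
  intro l
  induction l with
  | nil => intro d res; rfl
  | cons a t ih =>
    intro d res
    simp only [List.foldl_cons, numRabbitsBodyB, rabbitStep, beq_iff_eq]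
    by_cases h : d.getD a 0 = 0
    · simp only [h, if_true, ih, getD_insert_fun]
    · simp only [if_neg h, ih, getD_insert_fun]

lemma rabbitStep_comm (s : (Int → Int) × Int) (a b : Int) :
    rabbitStep (rabbitStep s a) b = rabbitStep (rabbitStep s b) a := by
  by_cases hab : a = b
  · subst hab; rfl
  · obtain ⟨f, r⟩ := s
    have hba : b ≠ a := Ne.symm hab
    simp only [rabbitStep]
    by_cases ha : f a = 0 <;> by_cases hb : f b = 0 <;>
      simp only [ha, hb, if_pos, if_neg, not_false_iff,
        Function.update_of_ne hab, Function.update_of_ne hba] <;>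
      rw [Function.update_comm hab] <;> ring_nf

-- hence the abstract fold is invariant under permutation of the input
lemma foldl_rabbitStep_perm {l₁ l₂ : List Int} (p : l₁.Perm l₂) (s : (Int → Int) × Int) :
    l₁.foldl rabbitStep s = l₂.foldl rabbitStep s := by
  induction p generalizing s with
  | nil => rfl
  | cons x _ ih => simp only [List.foldl_cons]; exact ih _
  | swap x y l => simp only [List.foldl_cons]; rw [rabbitStep_comm]
  | trans _ _ ih₁ ih₂ => exact (ih₁ s).trans (ih₂ s)

lemma mem_le_getLast : ∀ (l : List Int) (h : l ≠ []) (_ : l.Pairwise (fun a b => a ≤ b))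
    (x : Int), x ∈ l → x ≤ l.getLast h := by
  intro l
  induction l with
  | nil => intro h; exact absurd rfl h
  | cons y t ih =>
    intro h hp x hx
    rcases t.eq_nil_or_concat' with rfl | ht
    · simp at hx; simp [hx]
    · have htne : t ≠ [] := by rcases ht with ⟨_, _, rfl⟩; simp
      rw [List.getLast_cons htne]
      rcases List.mem_cons.mp hx with rfl | hxt
      · exact (List.pairwise_cons.mp hp).1 _ (List.getLast_mem htne)
      · exact ih htne (List.pairwise_cons.mp hp).2 x hxt

-- value of ys[i] at the split point
lemma pyGetD_split (pre suf : List Int) (a : Int) :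
    PySem.List.pyGetD (pre ++ a :: suf) (pre.length : Int) 0 = a := by
  rw [PySem.List.pyGetD_natCast]
  simp [List.getD]

lemma pyGetD_split_prev (pre suf : List Int) (a : Int) (h : pre ≠ []) :
    PySem.List.pyGetD (pre ++ a :: suf) ((pre.length : Int) - 1) 0 = pre.getLast h := by
  have h1 : 1 ≤ pre.length := List.length_pos_iff.mpr h
  have : ((pre.length : Int) - 1) = ((pre.length - 1 : Nat) : Int) := by omega
  rw [this, PySem.List.pyGetD_natCast]
  have hlt : pre.length - 1 < pre.length := by omega
  simp [List.getD, List.getElem?_append_left (by omega : pre.length - 1 < pre.length),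
    List.getElem?_eq_getElem hlt, List.getLast_eq_getElem]

lemma bridgeA : ∀ (suf pre : List Int) (count res : Int) (f : Int → Int),
    ((pre ++ suf).Pairwise (fun a b => a ≤ b)) →
    (∀ x, x ∉ pre → f x = 0) →
    f 0 = 0 →
    (∀ (h : pre ≠ []), pre.getLast h ≠ 0 → f (pre.getLast h) = count) →
    ((PySem.List.pyRange (pre.length) (PySem.List.len (pre ++ suf)) 1).foldl
        (numRabbitsBodyA (pre ++ suf)) (res, count)).1
      = (suf.foldl rabbitStep (f, res)).2 := by
  intro suf
  induction suf with
  | nil =>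
    intro pre count res f _ _ _ _
    simp [PySem.List.pyRange]
  | cons a rest ih =>
    intro pre count res f hpw h1 h0 h2
    have hilt : (pre.length : Int) < PySem.List.len (pre ++ a :: rest) := by
      simp only [PySem.List.len, List.length_append, List.length_cons]
      push_cast
      omega
    rw [PySem.List.pyRange_one_cons hilt, List.foldl_cons]
    have hys : (pre ++ [a]) ++ rest = pre ++ a :: rest := by simp
    have hlen : (((pre ++ [a]).length : Nat) : Int) = (pre.length : Int) + 1 := by
      simp
    have hpw' : (((pre ++ [a]) ++ rest).Pairwise (fun a b => a ≤ b)) := by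
      rw [hys]; exact hpw
    have hH1 : ∀ (v : Int) (x : Int), x ∉ pre ++ [a] → Function.update f a v x = 0 := by
      intro v x hx
      have hxa : x ≠ a := fun h => hx (by simp [h])
      rw [Function.update_of_ne hxa]
      exact h1 x (fun hmem => hx (by simp [hmem]))
    by_cases ha : a = 0
    · -- the answers[i] == 0 branch of A; in B f 0 stays 0
      subst ha
      have hbody : numRabbitsBodyA (pre ++ 0 :: rest) (res, count) (pre.length : Int)
          = (res + 1, count) := by
        simp [numRabbitsBodyA]
      have hstep : rabbitStep (f, res) 0 = (Function.update f 0 0, res + 1) := by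
        simp [rabbitStep, h0]
      rw [hbody, List.foldl_cons, hstep]
      have hkey := ih (pre ++ [0]) count (res + 1) (Function.update f 0 0)
        hpw' (hH1 0) (by simp)
        (by intro h hne
            rw [List.getLast_concat] at hne
            exact absurd rfl hne)
      rw [hys, hlen] at hkey
      simpa using hkey
    · -- a ≠ 0
      have hH0 : Function.update f a a 0 = 0 := by
        rw [Function.update_of_ne (fun h => ha h.symm)]; exact h0
      have hnewkey := ih (pre ++ [a]) a (res + (a + 1)) (Function.update f a a)
        hpw' (hH1 a) hH0
        (by intro h hne
            rw [List.getLast_concat]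
            exact Function.update_self a a f)
      rw [hys, hlen] at hnewkey
      by_cases hpre : pre = []
      · -- i == 0: new group
        subst hpre
        have fa : f a = 0 := h1 a (by simp)
        have hget := pyGetD_split [] rest a
        have hbody : numRabbitsBodyA ([] ++ a :: rest) (res, count) ((([] : List Int).length : Nat) : Int)
            = (res + (a + 1), a) := by
          simp only [List.nil_append, List.length_nil, Nat.cast_zero] at hget ⊢
          simp [numRabbitsBodyA, hget, ha]
        have hstep : rabbitStep (f, res) a = (Function.update f a a, res + (a + 1)) := by
          simp [rabbitStep, fa]
        rw [hbody, List.foldl_cons, hstep]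
        simpa using hnewkey
      · -- pre ≠ []
        have hprev := pyGetD_split_prev pre rest a hpre
        have hi0 : (((pre.length : Nat) : Int) == 0) = false := by
          have : 1 ≤ pre.length := List.length_pos_iff.mpr hpre
          simp; omega
        have hcross : ∀ x ∈ pre, x ≤ a :=
          fun x hx => (List.pairwise_append.mp hpw).2.2 x hx a (by simp)
        have hple : pre.getLast hpre ≤ a := hcross _ (List.getLast_mem hpre)
        by_cases hmem : a ∈ pre
        · -- a continues the current run: a = previous element
          have hap : pre.getLast hpre = a :=
            le_antisymm hple
              (mem_le_getLast pre hpre (List.pairwise_append.mp hpw).1 a hmem)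
          have fa : f a = count := by
            have := h2 hpre (by rw [hap]; exact ha)
            rwa [hap] at this
          by_cases hc : count = 0
          · -- count == 0: open a new group
            have hbody : numRabbitsBodyA (pre ++ a :: rest) (res, count) (pre.length : Int)
                = (res + (a + 1), a) := by
              simp [numRabbitsBodyA, hprev, ha, hap, hi0, hc]
            have hstep : rabbitStep (f, res) a = (Function.update f a a, res + (a + 1)) := by
              simp [rabbitStep, fa, hc]
            rw [hbody, List.foldl_cons, hstep]
            exact hnewkey
          · -- count ≠ 0: absorb into the current group
            have hbody : numRabbitsBodyA (pre ++ a :: rest) (res, count) (pre.length : Int)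
                = (res, count - 1) := by
              simp [numRabbitsBodyA, hprev, ha, hap, hi0, hc]
            have hstep : rabbitStep (f, res) a
                = (Function.update f a (count - 1), res) := by
              simp [rabbitStep, fa, hc]
            rw [hbody, List.foldl_cons, hstep]
            have hkey := ih (pre ++ [a]) (count - 1) res (Function.update f a (count - 1))
              hpw' (hH1 (count - 1))
              (by rw [Function.update_of_ne (fun h => ha h.symm)]; exact h0)
              (by intro h hne
                  rw [List.getLast_concat]
                  exact Function.update_self a (count - 1) f)
            rw [hys, hlen] at hkey
            exact hkey
        · -- a starts a fresh value: a ∉ pre, so a ≠ previous element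
          have hap : ¬(a = pre.getLast hpre) :=
            fun h => hmem (h ▸ List.getLast_mem hpre)
          have fa : f a = 0 := h1 a hmem
          have hbody : numRabbitsBodyA (pre ++ a :: rest) (res, count) (pre.length : Int)
              = (res + (a + 1), a) := by
            simp [numRabbitsBodyA, hprev, ha, hap, hi0]
          have hstep : rabbitStep (f, res) a = (Function.update f a a, res + (a + 1)) := by
            simp [rabbitStep, fa]
          rw [hbody, List.foldl_cons, hstep]
          exact hnewkey

-- ===== VERDICT (by name: the statement is the Claim_ definition above) =====
theorem num_rabbits_spec : Claim_equal_num_rabbits := by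
  intro answers _
  unfold Spec_num_rabbits num_rabbits num_rabbits_alt
  have hperm := PySem.List.sorted_perm answers (fun x => x) false
  have hpw : (PySem.List.sorted answers (fun x => x) false).Pairwise (fun a b => a ≤ b) :=
    PySem.List.sorted_pairwise answers (fun x => x)
  have hA := bridgeA (PySem.List.sorted answers (fun x => x) false) [] 0 0 (fun _ => 0)
    (by simpa using hpw) (fun _ _ => rfl) rfl (fun h => absurd rfl h)
  simp only [List.nil_append, List.length_nil, Nat.cast_zero] at hA
  rw [hA, foldl_rabbitStep_perm hperm, alt_bridge answers PySem.Dict.empty 0]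
  rfl
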